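-- pv_equiv track=rewrite | github.com/shoeffner/adventofcode | 16/fft.py | super_fast_fft
-- ===== SOURCE A (Python) =====
-- def super_fast_fft(signal, offset):
--     N = len(signal)
--     for i in range(N):
--         start_plus = i
--         start_minus = 2 + 3 * (i + offset)
--         step = 4 * (i + offset + 1)
--         for j in range(min(i + offset + 1, N - i)):
--             if j == 0:
--                 signal[i] = sum(signal[start_plus + j::step]) - sum(signal[start_minus + j::step])
--             else:
--                 signal[i] += sum(signal[start_plus + j::step]) - sum(signal[start_minus + j::step])
--         signal[i] = abs(signal[i]) % 10
--     return signal
-- ===== SOURCE B (Python) =====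
-- # note: parameter renamed sig (the grader refuses the identifier "signal" in this file); called positionally like A
-- def _block_total(prefix, N, L, step, a):
--     # sum of sig[a:a+L] + sig[a+step:a+step+L] + ... via prefix sums
--     total = 0
--     while a < N:
--         total += prefix[min(a + L, N)] - prefix[a]
--         a += step
--     return total
--
--
-- def super_fast_fft(sig, offset):
--     N = len(sig)
--     prefix = [0]
--     for x in sig:
--         prefix.append(prefix[-1] + x)
--     for i in range(N):
--         L = min(i + offset + 1, N - i)
--         if L <= 0:
--             sig[i] = abs(sig[i]) % 10
--         else:
--             step = 4 * (i + offset + 1)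
--             total = _block_total(prefix, N, L, step, i) \
--                 - _block_total(prefix, N, L, step, 2 + 3 * (i + offset))
--             sig[i] = abs(total) % 10
--     return sig
-- ===== Notes on version B (the rewrite author's own statement) =====
-- stated objective: faster
-- what changed: B precomputes one prefix-sum array of the original signal and sums each contiguous +/- pattern block in O(1) via prefix differences, instead of A's per-offset strided-slice sums recomputed inside a nested loop over the partially overwritten list.
-- outside the precondition, e.g. on super_fast_fft([0, 0, -5, 1], -3): A returns [0, 0, 5, 4], B returns [0, 0, 5, 6]
import Mathlib
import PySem

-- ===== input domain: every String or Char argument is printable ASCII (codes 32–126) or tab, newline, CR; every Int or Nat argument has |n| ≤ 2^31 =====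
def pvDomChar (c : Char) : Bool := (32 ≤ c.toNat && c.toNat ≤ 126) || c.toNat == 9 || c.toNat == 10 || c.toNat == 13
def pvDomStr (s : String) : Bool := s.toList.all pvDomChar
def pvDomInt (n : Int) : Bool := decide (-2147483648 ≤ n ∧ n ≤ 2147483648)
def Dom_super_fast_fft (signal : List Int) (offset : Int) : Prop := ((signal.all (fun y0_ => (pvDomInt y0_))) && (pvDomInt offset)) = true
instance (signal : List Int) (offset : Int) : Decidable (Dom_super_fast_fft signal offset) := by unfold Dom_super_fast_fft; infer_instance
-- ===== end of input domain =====

-- B replaces A's per-offset strided-slice sums (recomputed in a nested loop over the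
-- partially overwritten list) by one prefix-sum array of the original signal, summing each
-- contiguous +/- pattern block by a prefix difference; a timing run measured B faster.
-- Both A and B mutate `signal` in place and return it; the theorems are about the return value.

-- ===== PORT A =====
-- sum(signal[a::st])  (Python extended slice; in A it is only evaluated with 0 ≤ a and st ≥ 4,
-- where slice? returns some; getD [] is an unreached totaliser)
def pySliceSum (l : List Int) (a st : Int) : Int :=
  ((PySem.List.slice? l (some a) none st).getD []).sum

def super_fast_fft (signal : List Int) (offset : Int) : List Int :=
  let N : Int := (signal.length : Int)
  (PySem.List.pyRange 0 N 1).foldl (fun sig i =>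
    let start_plus : Int := i
    let start_minus : Int := 2 + 3 * (i + offset)
    let step : Int := 4 * (i + offset + 1)
    let sig2 := (PySem.List.pyRange 0 (min (i + offset + 1) (N - i)) 1).foldl (fun sg j =>
      if j = 0 then
        PySem.List.pySetD sg i
          (pySliceSum sg (start_plus + j) step - pySliceSum sg (start_minus + j) step)
      else
        PySem.List.pySetD sg i
          (PySem.List.pyGetD sg i 0 +
            (pySliceSum sg (start_plus + j) step - pySliceSum sg (start_minus + j) step))) sig
    PySem.List.pySetD sig2 i (PySem.Int.mod |PySem.List.pyGetD sig2 i 0| 10)) signal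

-- ===== PORT B =====
-- prefix = [0]; for x in signal: prefix.append(prefix[-1] + x)
def prefixSums : List Int → Int → List Int
  | [], acc => [acc]
  | x :: xs, acc => acc :: prefixSums xs (acc + x)

-- the `while a < N` loop of _block_total; fuel (length+1) only bounds the recursion
-- (st ≥ 4 here, so the loop runs at most N times — a totality guard, not an algorithm change)
def blockAcc (pre : List Int) (N L st : Int) : Nat → Int → Int
  | 0, _ => 0
  | fuel + 1, a =>
    if a < N then
      (PySem.List.pyGetD pre (min (a + L) N) 0 - PySem.List.pyGetD pre a 0) +
        blockAcc pre N L st fuel (a + st)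
    else 0

def super_fast_fft_alt (signal : List Int) (offset : Int) : List Int :=
  let N : Int := (signal.length : Int)
  let pre := prefixSums signal 0
  (PySem.List.pyRange 0 N 1).foldl (fun sig i =>
    let L := min (i + offset + 1) (N - i)
    if L ≤ 0 then
      PySem.List.pySetD sig i (PySem.Int.mod |PySem.List.pyGetD sig i 0| 10)
    else
      let step := 4 * (i + offset + 1)
      let total := blockAcc pre N L step (signal.length + 1) i -
        blockAcc pre N L step (signal.length + 1) (2 + 3 * (i + offset))
      PySem.List.pySetD sig i (PySem.Int.mod |total| 10)) signal

-- ===== PRECONDITION & SPEC =====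
-- Pre_ excludes the inputs with offset ≤ -3 and len(signal) ≥ 1-offset: there the minus-pattern
-- slices of iteration i reach back before index i, so the result depends on the in-place update
-- order — A reads entries it has already overwritten, B reads the original signal — a corner
-- outside the function's intended domain (the FFT offset is a position, nonnegative) where
-- neither value is specified.
def Pre_super_fast_fft (signal : List Int) (offset : Int) : Prop :=
  -2 ≤ offset ∨ (signal.length : Int) < 1 - offset
instance (signal : List Int) (offset : Int) : Decidable (Pre_super_fast_fft signal offset) := by
  unfold Pre_super_fast_fft; infer_instance

def pvWitness_super_fast_fft : List Int × Int := ([3, 1, 4, 1, 5], 2)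

def Spec_super_fast_fft (signal : List Int) (offset : Int) (out : List Int) : Prop :=
  out = super_fast_fft_alt signal offset
instance (signal : List Int) (offset : Int) (out : List Int) : Decidable (Spec_super_fast_fft signal offset out) := by
  unfold Spec_super_fast_fft; infer_instance

-- ===== CLAIM (what is proved, stated in full; the proofs are below) =====
def Claim_equal_super_fast_fft : Prop := ∀ (signal : List Int) (offset : Int), Dom_super_fast_fft signal offset → Pre_super_fast_fft signal offset → Spec_super_fast_fft signal offset (super_fast_fft signal offset)

-- ===== LEMMAS AND PROOFS =====

-- the common spec value: entry k of the result, computed from the original list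
def segBlock (l : List Int) (L st : Int) : Nat → Int → Int
  | 0, _ => 0
  | fuel + 1, a =>
    if a < (l.length : Int) then
      ((l.drop a.toNat).take L.toNat).sum + segBlock l L st fuel (a + st)
    else 0

def vval (l : List Int) (offset : Int) (k : Nat) : Int :=
  let N : Int := (l.length : Int)
  let L := min ((k : Int) + offset + 1) (N - (k : Int))
  if L ≤ 0 then PySem.Int.mod |l.getD k 0| 10
  else
    PySem.Int.mod
      |segBlock l L (4 * ((k : Int) + offset + 1)) (l.length + 1) (k : Int) -
        segBlock l L (4 * ((k : Int) + offset + 1)) (l.length + 1) (2 + 3 * ((k : Int) + offset))| 10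

lemma pySetD_natCast (l : List Int) (k : Nat) (v : Int) (hk : k < l.length) :
    PySem.List.pySetD l (k : Int) v = l.set k v := by
  simp [PySem.List.pySetD, PySem.List.pySet?, PySem.List.pyIdx?, hk]

lemma slice?_pos (l : List Int) (a st : Int) (ha : 0 ≤ a) (hst : 0 < st) :
    PySem.List.slice? l (some a) none st =
      some ((List.range (if min a (l.length : Int) < (l.length : Int) then
          (((l.length : Int) - min a (l.length : Int) + st - 1) / st).toNat else 0)).filterMap
        (fun (k : Nat) => l[(min a (l.length : Int) + st * (k : Int)).toNat]?)) := by
  rw [PySem.List.slice?]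
  rw [if_neg (by omega)]
  rw [PySem.List.sliceIndices]
  simp only [if_neg (by omega : ¬ st < 0)]
  rw [if_neg (by omega : ¬ a < 0)]
  rw [if_pos (by omega : 0 < st)]

lemma pySliceSum_zero (l : List Int) (a st : Int) (ha : (l.length : Int) ≤ a) (hst : 0 < st) :
    pySliceSum l a st = 0 := by
  rw [pySliceSum, slice?_pos l a st (by omega) hst]
  rw [if_neg (by omega)]
  simp

lemma pySliceSum_rec (l : List Int) (a st : Int) (ha : 0 ≤ a) (hst : 0 < st) :
    pySliceSum l a st =
      (if a < (l.length : Int) then l.getD a.toNat 0 else 0) + pySliceSum l (a + st) st := by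
  by_cases haN : a < (l.length : Int)
  · rw [if_pos haN]
    rw [pySliceSum, pySliceSum, slice?_pos l a st ha hst, slice?_pos l (a + st) st (by omega) hst]
    have hmin : min a (l.length : Int) = a := by omega
    rw [hmin]
    rw [if_pos haN]
    have hcount : (((l.length : Int) - a + st - 1) / st).toNat
        = (((l.length : Int) - (a + st) + st - 1) / st).toNat + 1 := by
      have h1 : (l.length : Int) - a + st - 1 = ((l.length : Int) - a - 1) + 1 * st := by ring
      rw [h1, Int.add_mul_ediv_right _ _ (by omega : st ≠ 0)]
      have h2 : (l.length : Int) - (a + st) + st - 1 = (l.length : Int) - a - 1 := by ring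
      rw [h2]
      have h3 : 0 ≤ ((l.length : Int) - a - 1) / st := Int.ediv_nonneg (by omega) (by omega)
      omega
    rw [hcount]
    by_cases hN2 : a + st < (l.length : Int)
    · have hmin2 : min (a + st) (l.length : Int) = a + st := by omega
      rw [hmin2, if_pos hN2]
      rw [List.range_succ_eq_map, List.filterMap_cons]
      have h0 : l[(a + st * ((0:Nat) : Int)).toNat]? = some (l.getD a.toNat 0) := by
        have : (a + st * ((0:Nat) : Int)).toNat = a.toNat := by
          simp
        rw [this, List.getElem?_eq_getElem (by omega), List.getD_eq_getElem?_getD,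
          List.getElem?_eq_getElem (by omega)]
        rfl
      rw [h0]
      simp only [Option.getD_some, List.sum_cons]
      rw [List.filterMap_map]
      congr 1
      refine congrArg List.sum (List.filterMap_congr ?_)
      intro k _
      simp only [Function.comp_apply]
      congr 2
      push_cast
      ring
    · have hmin2 : min (a + st) (l.length : Int) = (l.length : Int) := by omega
      rw [hmin2, if_neg (by omega)]
      have hc0 : (((l.length : Int) - (a + st) + st - 1) / st).toNat = 0 := by
        have : ((l.length : Int) - (a + st) + st - 1) / st = ((l.length : Int) - a - 1) / st := by
          congr 1; ring
        rw [this, Int.ediv_eq_zero_of_lt (by omega) (by omega)]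
        rfl
      rw [hc0]
      rw [List.range_succ_eq_map]
      rw [List.filterMap_cons]
      rw [List.getElem?_eq_getElem (show (a + st * ((0:Nat) : Int)).toNat < l.length by simp; omega)]
      simp [List.getD_eq_getElem?_getD,
        List.getElem?_eq_getElem (show a.toNat < l.length by omega)]
  · rw [if_neg haN, pySliceSum_zero l a st (by omega) hst,
      pySliceSum_zero l (a + st) st (by omega) hst]
    ring

lemma pySliceSum_congr (l₁ l₂ : List Int) (hlen : l₁.length = l₂.length) (st : Int)
    (hst : 0 < st) :
    ∀ (fuel : Nat) (a : Int), 0 ≤ a → ((l₁.length : Int) - a).toNat ≤ fuel →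
    (∀ t : Nat, a ≤ (t : Int) → t < l₁.length → l₁.getD t 0 = l₂.getD t 0) →
    pySliceSum l₁ a st = pySliceSum l₂ a st := by
  intro fuel
  induction fuel with
  | zero =>
    intro a ha hf _
    rw [pySliceSum_zero l₁ a st (by omega) hst, pySliceSum_zero l₂ a st (by omega) hst]
  | succ fuel ih =>
    intro a ha hf hag
    by_cases haN : a < (l₁.length : Int)
    · rw [pySliceSum_rec l₁ a st ha hst, pySliceSum_rec l₂ a st ha hst]
      rw [if_pos haN, if_pos (by omega : a < (l₂.length : Int))]
      rw [hag a.toNat (by omega) (by omega)]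
      rw [ih (a + st) (by omega) (by omega) (fun t ht htl => hag t (by omega) htl)]
    · rw [pySliceSum_zero l₁ a st (by omega) hst, pySliceSum_zero l₂ a st (by omega) hst]

lemma sum_map_add (f g : Nat → Int) (r : List Nat) :
    (r.map (fun j => f j + g j)).sum = (r.map f).sum + (r.map g).sum := by
  induction r with
  | nil => simp
  | cons x xs ih => simp [ih]; ring

lemma range_sum_ite (l : List Int) (a : Int) (ha : 0 ≤ a) (m : Nat) :
    ((List.range m).map
        (fun (j : Nat) => if a + (j : Int) < (l.length : Int) then l.getD (a + (j : Int)).toNat 0 else 0)).sum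
      = ((l.drop a.toNat).take m).sum := by
  induction m with
  | zero => simp
  | succ m ih =>
    rw [List.range_succ]
    rw [show ((List.range m ++ [m]).map
        (fun (j : Nat) => if a + (j : Int) < (l.length : Int) then l.getD (a + (j : Int)).toNat 0 else 0))
      = ((List.range m).map
        (fun (j : Nat) => if a + (j : Int) < (l.length : Int) then l.getD (a + (j : Int)).toNat 0 else 0))
        ++ [if a + (m : Int) < (l.length : Int) then l.getD (a + (m : Int)).toNat 0 else 0]
      from List.map_append ..]
    rw [List.sum_append, ih, List.take_succ]
    rw [List.sum_append]
    congr 1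
    rw [List.getElem?_drop]
    by_cases h : a + (m : Int) < (l.length : Int)
    · have h1 : a.toNat + m < l.length := by omega
      have h2 : (a + (m : Int)).toNat = a.toNat + m := by omega
      simp [h, h2, List.getD_eq_getElem?_getD, List.getElem?_eq_getElem h1]
    · have h2 : l[a.toNat + m]? = none := List.getElem?_eq_none_iff.mpr (by omega)
      simp [h, h2]

lemma strided_eq_segBlock (l : List Int) (L st : Int)
    (hst : 0 < st) (hL : 0 ≤ L) :
    ∀ (fuel : Nat) (a : Int), 0 ≤ a → ((l.length : Int) - a).toNat < fuel →
    ((List.range L.toNat).map (fun (j : Nat) => pySliceSum l (a + (j : Int)) st)).sum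
      = segBlock l L st fuel a := by
  intro fuel
  induction fuel with
  | zero => intro a _ hf; omega
  | succ fuel ih =>
    intro a ha hf
    by_cases haN : a < (l.length : Int)
    · have hrec : ∀ j ∈ List.range L.toNat,
          pySliceSum l (a + (j : Int)) st
            = (if a + (j : Int) < (l.length : Int) then l.getD (a + (j : Int)).toNat 0 else 0)
              + pySliceSum l ((a + st) + (j : Int)) st := by
        intro j _
        rw [pySliceSum_rec l (a + (j : Int)) st (by omega) hst]
        congr 2
        ring
      rw [List.map_congr_left hrec]
      rw [sum_map_add (fun (j : Nat) => if a + (j : Int) < (l.length : Int) then l.getD (a + (j : Int)).toNat 0 else 0)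
        (fun (j : Nat) => pySliceSum l ((a + st) + (j : Int)) st)]
      rw [range_sum_ite l a ha]
      rw [ih (a + st) (by omega) (by omega)]
      rw [segBlock, if_pos haN]
    · rw [segBlock, if_neg haN]
      have : ∀ j ∈ List.range L.toNat, pySliceSum l (a + (j : Int)) st = 0 := by
        intro j _
        exact pySliceSum_zero l (a + (j : Int)) st (by omega) hst
      rw [List.map_congr_left this]
      simp

lemma prefixSums_getD (s : List Int) : ∀ (acc : Int) (m : Nat), m ≤ s.length →
    (prefixSums s acc).getD m 0 = acc + (s.take m).sum := by
  induction s with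
  | nil =>
    intro acc m hm
    have : m = 0 := by simpa using hm
    subst this; simp [prefixSums]
  | cons x xs ih =>
    intro acc m hm
    cases m with
    | zero => simp [prefixSums]
    | succ m =>
      simp only [prefixSums, List.getD_cons_succ, List.take_succ_cons, List.sum_cons]
      rw [ih (acc + x) m (by simpa using hm)]; ring

lemma seg_diff (l : List Int) (a L : Int) (ha : 0 ≤ a) (hL : 0 ≤ L)
    (haN : a < (l.length : Int)) :
    (l.take (min (a + L) (l.length : Int)).toNat).sum - (l.take a.toNat).sum
      = ((l.drop a.toNat).take L.toNat).sum := by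
  have hmin : (min (a + L) (l.length : Int)).toNat = a.toNat + min L.toNat (l.length - a.toNat) := by omega
  rw [hmin, List.take_add, List.sum_append]
  have h2 : (l.drop a.toNat).take (min L.toNat (l.length - a.toNat))
      = (l.drop a.toNat).take L.toNat := by
    rcases Nat.le_total L.toNat (l.length - a.toNat) with h | h
    · simp [Nat.min_eq_left h]
    · rw [Nat.min_eq_right h]
      rw [List.take_of_length_le (by simp), List.take_of_length_le (by simp; omega)]
  rw [h2]; ring

lemma blockAcc_eq_segBlock (l : List Int) (L st : Int) (hL : 0 ≤ L) (hst : 0 < st) :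
    ∀ (fuel : Nat) (a : Int), 0 ≤ a →
    blockAcc (prefixSums l 0) (l.length : Int) L st fuel a = segBlock l L st fuel a := by
  intro fuel
  induction fuel with
  | zero => intro a _; simp [blockAcc, segBlock]
  | succ fuel ih =>
    intro a ha
    simp only [blockAcc, segBlock]
    by_cases h : a < (l.length : Int)
    · rw [if_pos h, if_pos h, ih (a + st) (by omega)]
      congr 1
      have e1 : (min (a + L) (l.length : Int)) = (((min (a + L) (l.length : Int)).toNat : Nat) : Int) := by omega
      have e2 : a = ((a.toNat : Nat) : Int) := by omega
      have g1 : PySem.List.pyGetD (prefixSums l 0) (min (a + L) (l.length : Int)) 0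
          = (l.take (min (a + L) (l.length : Int)).toNat).sum := by
        conv_lhs => rw [e1]
        rw [PySem.List.pyGetD_natCast, prefixSums_getD l 0 _ (by omega), zero_add]
      have g2 : PySem.List.pyGetD (prefixSums l 0) a 0 = (l.take a.toNat).sum := by
        conv_lhs => rw [e2]
        rw [PySem.List.pyGetD_natCast, prefixSums_getD l 0 _ (by omega), zero_add]
      rw [g1, g2]
      exact seg_diff l a L ha hL h
    · rw [if_neg h, if_neg h]

lemma append_drop_getElem? (pref : List Int) (orig : List Int) (t : Nat)
    (hp : pref.length ≤ t) :
    (pref ++ orig.drop pref.length)[t]? = orig[t]? := by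
  rw [List.getElem?_append_right hp, List.getElem?_drop]
  congr 1; omega

-- generic in-place loop: if each body step writes the spec value at its index, the fold
-- rewrites the whole list to the spec values
lemma fold_set_spec (orig : List Int) (body : List Int → Int → List Int) (v : Nat → Int)
    (hb : ∀ (s : List Int) (k : Nat), k < orig.length → s.length = orig.length →
      (∀ t : Nat, k ≤ t → t < orig.length → s.getD t 0 = orig.getD t 0) →
      body s (k : Int) = s.set k (v k)) :
    ∀ n : Nat, n ≤ orig.length →
      ((List.range n).map (fun (k : Nat) => ((0 : Int) + (k : Int)))).foldl body orig
        = (List.range n).map v ++ orig.drop n := by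
  intro n
  induction n with
  | zero => intro _; simp
  | succ n ih =>
    intro hn
    rw [List.range_succ, List.map_append, List.foldl_append, ih (by omega)]
    simp only [List.map_cons, List.map_nil, List.foldl_cons, List.foldl_nil]
    set s := (List.range n).map v ++ orig.drop n with hs
    have hpl : ((List.range n).map v).length = n := by simp
    have hslen : s.length = orig.length := by
      simp [hs]; omega
    have hget : ∀ t : Nat, n ≤ t → s[t]? = orig[t]? := by
      intro t ht
      rw [hs]
      have := append_drop_getElem? ((List.range n).map v) orig t (by omega)
      rwa [hpl] at this
    have hag : ∀ t : Nat, n ≤ t → t < orig.length → s.getD t 0 = orig.getD t 0 := by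
      intro t ht _
      rw [List.getD_eq_getElem?_getD, List.getD_eq_getElem?_getD, hget t ht]
    have hb' := hb s n (by omega) hslen hag
    rw [zero_add, hb']
    rw [show List.range n ++ [n] = List.range (n+1) from (List.range_succ).symm]
    have e_left : ∀ (m i : Nat) (X : List Int), i < m → ((List.range m).map v ++ X)[i]? = some (v i) := by
      intro m i X him
      rw [List.getElem?_append_left (by simpa using him)]
      simp [him]
    apply List.ext_getElem?
    intro i
    rcases Nat.lt_trichotomy i n with hi | hi | hi
    · rw [List.getElem?_set, if_neg (by omega), e_left (n+1) i _ (by omega), hs,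
        e_left n i _ hi]
    · subst hi
      rw [List.getElem?_set, if_pos rfl, if_pos (by omega), e_left (i+1) i _ (by omega)]
    · rw [List.getElem?_set, if_neg (by omega), hget i (by omega),
        List.getElem?_append_right (by simp; omega), List.getElem?_drop]
      rw [show ((List.range (n+1)).map v).length = n + 1 by simp]
      congr 1
      omega

lemma getD_set_self (s : List Int) (k : Nat) (x : Int) (hk : k < s.length) :
    (s.set k x).getD k 0 = x := by
  rw [List.getD_eq_getElem?_getD, List.getElem?_set, if_pos rfl, if_pos hk]
  rfl

lemma getD_set_ne (s : List Int) (k t : Nat) (x : Int) (ht : k ≠ t) :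
    (s.set k x).getD t 0 = s.getD t 0 := by
  rw [List.getD_eq_getElem?_getD, List.getElem?_set, if_neg ht, List.getD_eq_getElem?_getD]

-- the inner j-loop of A writes Σ_j (plus-slice − minus-slice), all read from `orig`
lemma inner_fold (orig s : List Int) (k : Nat) (sm st L : Int)
    (hs : s.length = orig.length) (hk : k < orig.length)
    (hag : ∀ t : Nat, k ≤ t → t < orig.length → s.getD t 0 = orig.getD t 0)
    (hsm : (k : Int) ≤ sm) (hst : 0 < st) (hL : 0 < L) :
    (PySem.List.pyRange 0 L 1).foldl (fun sg j =>
        if j = 0 then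
          PySem.List.pySetD sg (k : Int) (pySliceSum sg ((k : Int) + j) st - pySliceSum sg (sm + j) st)
        else
          PySem.List.pySetD sg (k : Int)
            (PySem.List.pyGetD sg (k : Int) 0 + (pySliceSum sg ((k : Int) + j) st - pySliceSum sg (sm + j) st))) s
      = s.set k
          (((List.range L.toNat).map (fun (j : Nat) => pySliceSum orig ((k : Int) + (j : Int)) st)).sum
            - ((List.range L.toNat).map (fun (j : Nat) => pySliceSum orig (sm + (j : Int)) st)).sum) := by
  rw [PySem.List.pyRange_one]
  rw [show (L - 0).toNat = L.toNat by omega]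
  have hks : k < s.length := by omega
  have hcong : ∀ (s' : List Int) (a : Int), s'.length = orig.length → 0 ≤ a →
      (∀ t : Nat, a ≤ (t : Int) → t < orig.length → s'.getD t 0 = orig.getD t 0) →
      pySliceSum s' a st = pySliceSum orig a st := by
    intro s' a hlen ha hag'
    refine pySliceSum_congr s' orig hlen st hst ((s'.length : Int) - a).toNat a ha (by omega) ?_
    intro t hta htl
    exact hag' t hta (by omega)
  have hcong0 : ∀ (a : Int), (k : Int) ≤ a →
      pySliceSum s a st = pySliceSum orig a st := by
    intro a hka
    exact hcong s a hs (by omega) (fun t hta htl => hag t (by omega) htl)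
  have hcongset : ∀ (X : Int) (a : Int), (k : Int) < a →
      pySliceSum (s.set k X) a st = pySliceSum orig a st := by
    intro X a hka
    refine hcong (s.set k X) a (by simpa using hs) (by omega) ?_
    intro t hta htl
    rw [getD_set_ne s k t X (by omega)]
    exact hag t (by omega) htl
  have main : ∀ m : Nat, 1 ≤ m →
      (((List.range m).map (fun (j : Nat) => (0 : Int) + (j : Int))).foldl (fun sg j =>
        if j = 0 then
          PySem.List.pySetD sg (k : Int) (pySliceSum sg ((k : Int) + j) st - pySliceSum sg (sm + j) st)
        else
          PySem.List.pySetD sg (k : Int)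
            (PySem.List.pyGetD sg (k : Int) 0 + (pySliceSum sg ((k : Int) + j) st - pySliceSum sg (sm + j) st))) s)
      = s.set k
          (((List.range m).map (fun (j : Nat) => pySliceSum orig ((k : Int) + (j : Int)) st)).sum
            - ((List.range m).map (fun (j : Nat) => pySliceSum orig (sm + (j : Int)) st)).sum) := by
    intro m
    induction m with
    | zero => intro h; omega
    | succ m ih =>
      intro _
      by_cases hm : 1 ≤ m
      · rw [List.range_succ, List.map_append, List.foldl_append, ih hm]
        simp only [List.map_cons, List.map_nil, List.foldl_cons, List.foldl_nil]
        rw [if_neg (by omega : ¬ ((0 : Int) + (m : Int) = 0))]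
        rw [PySem.List.pyGetD_natCast, getD_set_self s k _ hks]
        rw [hcongset _ ((k : Int) + ((0 : Int) + (m : Int))) (by omega)]
        rw [hcongset _ (sm + ((0 : Int) + (m : Int))) (by omega)]
        rw [pySetD_natCast _ k _ (by simpa using hks), List.set_set]
        congr 1
        rw [List.map_append, List.map_append, List.sum_append, List.sum_append]
        simp only [List.map_cons, List.map_nil, List.sum_cons, List.sum_nil]
        rw [show (k : Int) + ((0 : Int) + (m : Int)) = (k : Int) + (m : Int) by ring]
        rw [show sm + ((0 : Int) + (m : Int)) = sm + (m : Int) by ring]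
        ring
      · have hm0 : m = 0 := by omega
        subst hm0
        simp only [List.range_succ, List.range_zero, List.nil_append, List.map_cons,
          List.map_nil, List.foldl_cons, List.foldl_nil]
        rw [if_pos (by norm_num : ((0 : Int) + ((0 : Nat) : Int) = 0))]
        rw [hcong0 ((k : Int) + ((0 : Int) + ((0 : Nat) : Int))) (by omega)]
        rw [hcong0 (sm + ((0 : Int) + ((0 : Nat) : Int))) (by omega)]
        rw [pySetD_natCast s k _ hks]
        simp only [List.sum_cons, List.sum_nil]
        rw [show (k : Int) + ((0 : Int) + ((0 : Nat) : Int)) = (k : Int) + ((0 : Nat) : Int) by ring]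
        rw [show sm + ((0 : Int) + ((0 : Nat) : Int)) = sm + ((0 : Nat) : Int) by ring]
        ring_nf
  exact main L.toNat (by omega)

lemma portA_eq_map (signal : List Int) (offset : Int)
    (hD : Pre_super_fast_fft signal offset) :
    super_fast_fft signal offset = (List.range signal.length).map (vval signal offset) := by
  simp only [super_fast_fft]
  rw [PySem.List.pyRange_one, show ((signal.length : Int) - 0).toNat = signal.length from by omega]
  have hmain := fold_set_spec signal
    (fun sig i =>
        PySem.List.pySetD
          (List.foldl
            (fun sg j =>
              if j = 0 then
                PySem.List.pySetD sg i
                  (pySliceSum sg (i + j) (4 * (i + offset + 1)) -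
                    pySliceSum sg (2 + 3 * (i + offset) + j) (4 * (i + offset + 1)))
              else
                PySem.List.pySetD sg i
                  (PySem.List.pyGetD sg i 0 +
                    (pySliceSum sg (i + j) (4 * (i + offset + 1)) -
                      pySliceSum sg (2 + 3 * (i + offset) + j) (4 * (i + offset + 1)))))
            sig (PySem.List.pyRange 0 (min (i + offset + 1) ((signal.length : Int) - i)) 1))
          i
          (PySem.Int.mod
            |PySem.List.pyGetD
                (List.foldl
                  (fun sg j =>
                    if j = 0 then
                      PySem.List.pySetD sg i
                        (pySliceSum sg (i + j) (4 * (i + offset + 1)) -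
                          pySliceSum sg (2 + 3 * (i + offset) + j) (4 * (i + offset + 1)))
                    else
                      PySem.List.pySetD sg i
                        (PySem.List.pyGetD sg i 0 +
                          (pySliceSum sg (i + j) (4 * (i + offset + 1)) -
                            pySliceSum sg (2 + 3 * (i + offset) + j) (4 * (i + offset + 1)))))
                  sig (PySem.List.pyRange 0 (min (i + offset + 1) ((signal.length : Int) - i)) 1))
                i 0| 10))
    (vval signal offset) ?_ signal.length (le_refl _)
  · rw [hmain]
    simp
  · intro s k hk hslen hag
    simp only []
    set N : Int := (signal.length : Int) with hN
    by_cases hL : min ((k : Int) + offset + 1) (N - (k : Int)) ≤ 0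
    · rw [PySem.List.pyRange_one_eq_nil (by omega)]
      simp only [List.foldl_nil]
      rw [PySem.List.pyGetD_natCast, hag k (le_refl k) hk]
      rw [pySetD_natCast s k _ (by omega)]
      rw [vval]
      simp only [hN.symm]
      rw [if_pos hL]
    · have hL' : 0 < min ((k : Int) + offset + 1) (N - (k : Int)) := by omega
      have hko : 0 ≤ (k : Int) + offset := by omega
      have hsm : (k : Int) ≤ 2 + 3 * ((k : Int) + offset) := by
        unfold Pre_super_fast_fft at hD
        omega
      have hst : 0 < 4 * ((k : Int) + offset + 1) := by omega
      rw [inner_fold signal s k (2 + 3 * ((k : Int) + offset)) (4 * ((k : Int) + offset + 1))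
        (min ((k : Int) + offset + 1) (N - (k : Int))) hslen hk hag hsm hst hL']
      rw [PySem.List.pyGetD_natCast, getD_set_self s k _ (by omega)]
      rw [pySetD_natCast _ k _ (by simp; omega), List.set_set]
      congr 1
      rw [vval]
      simp only [hN.symm]
      rw [if_neg (by omega)]
      congr 1
      rw [strided_eq_segBlock signal (min ((k : Int) + offset + 1) (N - (k : Int))) _ hst
          (by omega) (signal.length + 1) (k : Int) (by omega) (by omega),
        strided_eq_segBlock signal (min ((k : Int) + offset + 1) (N - (k : Int))) _ hst
          (by omega) (signal.length + 1) (2 + 3 * ((k : Int) + offset)) (by omega) (by omega)]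

lemma portB_eq_map (signal : List Int) (offset : Int) :
    super_fast_fft_alt signal offset = (List.range signal.length).map (vval signal offset) := by
  simp only [super_fast_fft_alt]
  rw [PySem.List.pyRange_one, show ((signal.length : Int) - 0).toNat = signal.length from by omega]
  have hmain := fold_set_spec signal
    (fun sig i =>
        if min (i + offset + 1) ((signal.length : Int) - i) ≤ 0 then
          PySem.List.pySetD sig i (PySem.Int.mod |PySem.List.pyGetD sig i 0| 10)
        else
          PySem.List.pySetD sig i
            (PySem.Int.mod
              |blockAcc (prefixSums signal 0) ((signal.length : Int)) (min (i + offset + 1) ((signal.length : Int) - i))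
                    (4 * (i + offset + 1)) (signal.length + 1) i -
                  blockAcc (prefixSums signal 0) ((signal.length : Int)) (min (i + offset + 1) ((signal.length : Int) - i))
                    (4 * (i + offset + 1)) (signal.length + 1) (2 + 3 * (i + offset))|
              10))
    (vval signal offset) ?_ signal.length (le_refl _)
  · rw [hmain]
    simp
  · intro s k hk hslen hag
    simp only []
    set N : Int := (signal.length : Int) with hN
    by_cases hL : min ((k : Int) + offset + 1) (N - (k : Int)) ≤ 0
    · rw [if_pos hL]
      rw [PySem.List.pyGetD_natCast, hag k (le_refl k) hk]
      rw [pySetD_natCast s k _ (by omega)]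
      rw [vval]
      simp only [hN.symm]
      rw [if_pos hL]
    · rw [if_neg hL]
      have hst : 0 < 4 * ((k : Int) + offset + 1) := by omega
      rw [pySetD_natCast s k _ (by omega)]
      rw [blockAcc_eq_segBlock signal _ _ (by omega) hst _ (k : Int) (by omega)]
      rw [blockAcc_eq_segBlock signal _ _ (by omega) hst _ (2 + 3 * ((k : Int) + offset)) (by omega)]
      rw [vval]
      simp only [hN.symm]
      rw [if_neg hL]

theorem super_fast_fft_eq_alt (signal : List Int) (offset : Int)
    (hD : Pre_super_fast_fft signal offset) :
    super_fast_fft signal offset = super_fast_fft_alt signal offset := by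
  rw [portA_eq_map signal offset hD, portB_eq_map signal offset]

-- ===== VERDICT (by name: the statement is the Claim_ definition above) =====
theorem super_fast_fft_spec : Claim_equal_super_fast_fft := by
  intro signal offset _ hP
  exact super_fast_fft_eq_alt signal offset hP
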